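-- pv_equiv track=rewrite | github.com/RJB888/trigrams | src/trigrams.py | convert_book_to_list_of_words
-- ===== SOURCE A (Python) =====
-- def convert_book_to_list_of_words(book):
--     """Remove whitespace and punctuation from word list and return list."""
--     book = book.replace('\n', ' ')
--     book = book.split(' ')
--     filtered_book = []
--     for word in book:
--         for c in word:
--             word = ''.join([c for c in word if c.isalpha()])
--         if word:
--             filtered_book.append(word)
--     return filtered_book
-- ===== SOURCE B (Python) =====
-- def convert_book_to_list_of_words(book):
--     """Single pass over the characters: flush buffer on ' '/'\n', collect alpha chars."""
--     words = []
--     buf = []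
--     for c in book:
--         if c == ' ' or c == '\n':
--             if buf:
--                 words.append(''.join(buf))
--                 buf = []
--         elif c.isalpha():
--             buf.append(c)
--     if buf:
--         words.append(''.join(buf))
--     return words
-- ===== Notes on version B (the rewrite author's own statement) =====
-- stated objective: faster
-- what changed: Replaces replace-newlines + split-on-space + per-token character filtering (which rebuilds each token once per character, quadratic per token) with a single character scan maintaining a current-word buffer flushed at space and newline delimiters.
import Mathlib
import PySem

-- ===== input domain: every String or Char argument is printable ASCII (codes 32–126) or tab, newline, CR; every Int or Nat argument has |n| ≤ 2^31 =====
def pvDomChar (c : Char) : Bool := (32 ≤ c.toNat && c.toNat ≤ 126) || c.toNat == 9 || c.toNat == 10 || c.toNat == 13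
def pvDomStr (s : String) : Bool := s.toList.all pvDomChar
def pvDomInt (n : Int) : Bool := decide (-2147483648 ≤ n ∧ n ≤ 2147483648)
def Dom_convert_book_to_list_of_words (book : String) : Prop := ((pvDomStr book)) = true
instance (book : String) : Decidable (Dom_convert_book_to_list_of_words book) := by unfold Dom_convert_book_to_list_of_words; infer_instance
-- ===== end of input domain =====

-- B replaces replace+split+per-token filtering with one linear character scan and a word buffer (faster: A re-filters each token once per character of the token).

-- ===== PORT A =====
def convert_book_to_list_of_words (book : String) : List String :=
  -- book = book.replace('\n', ' '); book = book.split(' ');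
  -- for word in book: for c in word: word = ''.join([c for c in word if c.isalpha()]); if word: filtered_book.append(word)
  (PySem.Chars.splitOn (PySem.Chars.replace book.toList ['\n'] [' ']) [' ']).foldl
    (fun acc word =>
      let w := word.foldl (fun w _c => w.filter PySem.Chars.isalpha) word
      if w ≠ [] then acc ++ [String.ofList w] else acc) ([] : List String)

-- ===== PORT B =====
-- flush: append the buffer as a word if non-empty
def pvFinish (st : List String × List Char) : List String :=
  if st.2 ≠ [] then st.1 ++ [String.ofList st.2] else st.1

-- one character step: flush on ' '/'\n', collect alpha chars into the buffer
def pvStepB (st : List String × List Char) (c : Char) : List String × List Char :=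
  if c = ' ' ∨ c = '\n' then (pvFinish st, [])
  else if PySem.Chars.isalpha c then (st.1, st.2 ++ [c]) else st

def convert_book_to_list_of_words_alt (book : String) : List String :=
  pvFinish (book.toList.foldl pvStepB ([], []))

-- ===== PRECONDITION & SPEC =====
def Spec_convert_book_to_list_of_words (book : String) (out : List String) : Prop := out = convert_book_to_list_of_words_alt book
instance (book : String) (out : List String) : Decidable (Spec_convert_book_to_list_of_words book out) := by unfold Spec_convert_book_to_list_of_words; infer_instance

-- ===== CLAIM (what is proved, stated in full; the proofs are below) =====
def Claim_equal_convert_book_to_list_of_words : Prop := ∀ (book : String), Dom_convert_book_to_list_of_words book → Spec_convert_book_to_list_of_words book (convert_book_to_list_of_words book)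

-- ===== LEMMAS AND PROOFS =====

/-- substituting '\n' by ' ' characterwise -/
def pvSub (c : Char) : Char := if c = '\n' then ' ' else c

/-- reference split on ' ': (first piece, remaining pieces), pieces unfiltered -/
def pvSplitS : List Char → List Char × List (List Char)
  | [] => ([], [])
  | c :: cs =>
    let p := pvSplitS cs
    if c = ' ' then ([], p.1 :: p.2) else (c :: p.1, p.2)

/-- reference split on ' ' or '\n' -/
def pvSplitD : List Char → List Char × List (List Char)
  | [] => ([], [])
  | c :: cs =>
    let p := pvSplitD cs
    if c = ' ' ∨ c = '\n' then ([], p.1 :: p.2) else (c :: p.1, p.2)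

lemma pv_replace_go (fuel : Nat) (l acc : List Char) (h : l.length ≤ fuel) :
    PySem.Chars.replace.go ['\n'] [' '] fuel l acc = acc.reverse ++ l.map pvSub := by
  induction fuel generalizing l acc with
  | zero =>
    cases l with
    | nil => simp [PySem.Chars.replace.go]
    | cons c t => simp at h
  | succ n ih =>
    cases l with
    | nil => simp [PySem.Chars.replace.go]
    | cons c t =>
      simp only [List.length_cons] at h
      rw [PySem.Chars.replace.go]
      by_cases hc : c = '\n'
      · subst hc
        rw [if_pos (by simp [List.isPrefixOf])]
        rw [show List.drop (List.length ['\n']) ('\n' :: t) = t from rfl]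
        rw [ih t _ (by omega)]
        simp [pvSub]
      · rw [if_neg (by simp [List.isPrefixOf]; exact fun hh => hc hh.symm)]
        rw [ih t _ (by omega)]
        simp [pvSub, hc]

lemma pv_replace (l : List Char) :
    PySem.Chars.replace l ['\n'] [' '] = l.map pvSub := by
  simpa using pv_replace_go l.length l [] (le_refl _)

lemma pv_splitOn_go (fuel : Nat) (l cur : List Char) (acc : List (List Char))
    (h : l.length ≤ fuel) :
    PySem.Chars.splitOn.go [' '] fuel l cur acc
      = acc.reverse ++ (cur.reverse ++ (pvSplitS l).1) :: (pvSplitS l).2 := by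
  induction fuel generalizing l cur acc with
  | zero =>
    cases l with
    | nil => simp [PySem.Chars.splitOn.go, pvSplitS]
    | cons c t => simp at h
  | succ n ih =>
    cases l with
    | nil => simp [PySem.Chars.splitOn.go, pvSplitS]
    | cons c t =>
      simp only [List.length_cons] at h
      rw [PySem.Chars.splitOn.go]
      by_cases hc : c = ' '
      · subst hc
        rw [if_pos (by simp [List.isPrefixOf])]
        rw [show List.drop (List.length [' ']) (' ' :: t) = t from rfl]
        rw [ih t _ _ (by omega)]
        simp [pvSplitS]
      · rw [if_neg (by simp [List.isPrefixOf]; exact fun hh => hc hh.symm)]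
        rw [ih t _ _ (by omega)]
        simp [pvSplitS, hc]

lemma pv_splitOn (l : List Char) :
    PySem.Chars.splitOn l [' '] = ((pvSplitS l).1) :: (pvSplitS l).2 := by
  unfold PySem.Chars.splitOn
  rw [pv_splitOn_go (l.length + 1) l [] [] (by omega)]
  simp

lemma pv_splitS_map (l : List Char) : pvSplitS (l.map pvSub) = pvSplitD l := by
  induction l with
  | nil => rfl
  | cons c t ih =>
    by_cases hc : c = ' ' ∨ c = '\n'
    · have hs : pvSub c = ' ' := by rcases hc with h | h <;> simp [pvSub, h]
      simp [pvSplitS, pvSplitD, hs, hc, ih]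
    · have h1 : ¬ c = ' ' := fun h => hc (Or.inl h)
      have h2 : ¬ c = '\n' := fun h => hc (Or.inr h)
      have hs : pvSub c = c := by simp [pvSub, h2]
      simp [pvSplitS, pvSplitD, hs, h1, h2, ih]

/-- A's inner loop: re-filtering once per character equals filtering once -/
lemma pv_inner (w : List Char) :
    w.foldl (fun w _c => w.filter PySem.Chars.isalpha) w = w.filter PySem.Chars.isalpha := by
  cases w with
  | nil => rfl
  | cons c t =>
    have key : ∀ (it : List Char) (s : List Char), s.filter PySem.Chars.isalpha = s →
        it.foldl (fun w _c => w.filter PySem.Chars.isalpha) s = s := by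
      intro it
      induction it with
      | nil => intro s _; rfl
      | cons a b ih =>
        intro s hs
        simp only [List.foldl_cons, hs]
        exact ih s hs
    simp only [List.foldl_cons]
    exact key t _ (by simp [List.filter_filter])

/-- A's outer loop as map + filter -/
lemma pv_afold (ws : List (List Char)) (acc : List String) :
    ws.foldl (fun acc word =>
      let w := word.foldl (fun w _c => w.filter PySem.Chars.isalpha) word
      if w ≠ [] then acc ++ [String.ofList w] else acc) acc
    = acc ++ (((ws.map (·.filter PySem.Chars.isalpha)).filter (· ≠ [])).map String.ofList) := by
  induction ws generalizing acc with
  | nil => simp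
  | cons w t ih =>
    rw [List.foldl_cons]
    by_cases hw : w.filter PySem.Chars.isalpha = []
    · rw [show (let w' := w.foldl (fun w _c => w.filter PySem.Chars.isalpha) w
            ; if w' ≠ [] then acc ++ [String.ofList w'] else acc) = acc by
          simp only [pv_inner]; simp [hw]]
      rw [ih]
      simp [hw]
    · rw [show (let w' := w.foldl (fun w _c => w.filter PySem.Chars.isalpha) w
            ; if w' ≠ [] then acc ++ [String.ofList w'] else acc)
            = acc ++ [String.ofList (w.filter PySem.Chars.isalpha)] by
          simp only [pv_inner]; simp [hw]]
      rw [ih]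
      simp [hw]

lemma pv_binv (cs : List Char) (acc : List String) (buf : List Char) :
    pvFinish (cs.foldl pvStepB (acc, buf))
    = acc ++ ((((buf ++ (pvSplitD cs).1.filter PySem.Chars.isalpha)
          :: (pvSplitD cs).2.map (·.filter PySem.Chars.isalpha)).filter (· ≠ [])).map String.ofList) := by
  induction cs generalizing acc buf with
  | nil =>
    by_cases hb : buf = [] <;>
      simp [pvSplitD, pvFinish, hb]
  | cons c t ih =>
    rw [List.foldl_cons]
    by_cases hc : c = ' ' ∨ c = '\n'
    · rw [show pvStepB (acc, buf) c = (pvFinish (acc, buf), []) by simp [pvStepB, hc]]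
      rw [ih]
      have hsplit : pvSplitD (c :: t) = ([], (pvSplitD t).1 :: (pvSplitD t).2) := by
        rw [pvSplitD]; rw [if_pos hc]
      have h1s : (pvSplitD (c :: t)).1 = [] := by rw [hsplit]
      have h2s : (pvSplitD (c :: t)).2 = (pvSplitD t).1 :: (pvSplitD t).2 := by rw [hsplit]
      rw [h1s, h2s, List.map_cons]
      rw [show List.filter PySem.Chars.isalpha ([] : List Char) = [] from rfl, List.append_nil]
      by_cases hb : buf = []
      · subst hb
        rw [show pvFinish (acc, []) = acc from rfl]
        conv_rhs => rw [List.filter_cons]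
        rw [if_neg (by simp)]
        rw [List.nil_append]
      · rw [show pvFinish (acc, buf) = acc ++ [String.ofList buf] from by
          rw [pvFinish]; rw [if_pos (show buf ≠ [] from hb)]]
        conv_rhs => rw [List.filter_cons]
        rw [if_pos (show decide (buf ≠ []) = true from by simp [hb])]
        rw [List.map_cons, List.nil_append, List.append_assoc]
        rfl
    · have h1 : ¬ c = ' ' := fun h => hc (Or.inl h)
      have h2 : ¬ c = '\n' := fun h => hc (Or.inr h)
      by_cases ha : PySem.Chars.isalpha c = true
      · rw [show pvStepB (acc, buf) c = (acc, buf ++ [c]) by simp [pvStepB, hc, ha]]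
        rw [ih]
        simp [pvSplitD, h1, h2, ha]
      · rw [show pvStepB (acc, buf) c = (acc, buf) by simp [pvStepB, hc, ha]]
        rw [ih]
        simp [pvSplitD, h1, h2, ha]
-- ===== VERDICT (by name: the statement is the Claim_ definition above) =====
theorem convert_book_to_list_of_words_spec : Claim_equal_convert_book_to_list_of_words := by
  intro book _
  unfold Spec_convert_book_to_list_of_words convert_book_to_list_of_words convert_book_to_list_of_words_alt
  rw [pv_replace, pv_splitOn, pv_splitS_map, pv_afold, pv_binv]
  simp
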